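-- pv_equiv track=rewrite | github.com/eddiesong/POS | 1.py | replace_rare
-- ===== SOURCE A (Python) =====
-- def replace_rare(brown, knownwords):
--     rare = []
--     sentence = []
--     knownwords_set = set(knownwords)
--
--     # Replace the tokens in the brown that doesn't appear in "knownwords"
--     # with "_Rare_"
--     for token in brown:
--         if token in knownwords_set:
--             sentence.append(token)
--         else:
--             sentence.append("_RARE_")
--
--         # "STOP" indicates the end of a sentence, rare is a list that contains a
--         # list of tokens
--         if token == "STOP":
--             rare.append(sentence)
--             sentence = []
--             # print sentence
--
--     return rare
-- ===== SOURCE B (Python) =====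
-- def replace_rare(brown, knownwords):
--     # Phase 1: group the stream into sentences ending with "STOP" (trailing
--     # unfinished material is dropped, as in the original).
--     sentences = []
--     current = []
--     for token in brown:
--         current.append(token)
--         if token == "STOP":
--             sentences.append(current)
--             current = []
--     # Phase 2: map the rare-replacement over each grouped sentence.
--     known_set = set(knownwords)
--     return [[t if t in known_set else "_RARE_" for t in sentence]
--             for sentence in sentences]
-- ===== Notes on version B (the rewrite author's own statement) =====
-- stated objective: alternative
-- what changed: A fuses replacement and sentence-splitting in one loop with two mutable accumulators; B first groups the token stream into sentences at STOP markers, then maps the _RARE_ substitution over each sentence with comprehensions.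
import Mathlib
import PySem

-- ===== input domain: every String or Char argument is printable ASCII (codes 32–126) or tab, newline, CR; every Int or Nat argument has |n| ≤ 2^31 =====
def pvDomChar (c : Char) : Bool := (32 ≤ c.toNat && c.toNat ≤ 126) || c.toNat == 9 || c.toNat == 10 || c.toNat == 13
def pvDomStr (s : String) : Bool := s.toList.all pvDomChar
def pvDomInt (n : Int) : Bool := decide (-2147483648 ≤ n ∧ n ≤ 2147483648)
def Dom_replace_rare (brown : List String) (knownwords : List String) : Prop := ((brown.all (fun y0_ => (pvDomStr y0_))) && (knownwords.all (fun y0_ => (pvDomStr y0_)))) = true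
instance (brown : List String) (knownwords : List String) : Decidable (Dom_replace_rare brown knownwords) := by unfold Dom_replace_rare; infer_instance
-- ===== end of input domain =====

-- B replaces A's single fused loop by two phases: group the stream into sentences at "STOP", then map the _RARE_ substitution over each sentence (alternative decomposition, same cost).

-- ===== PORT A =====
def replace_rare (brown : List String) (knownwords : List String) : List (List String) :=
  let knownwords_set : PySem.Set String := PySem.Set.ofList knownwords
  let st := brown.foldl
    (fun (st : List (List String) × List String) token =>
      let sentence := st.2 ++ [if knownwords_set.contains token then token else "_RARE_"]
      if token == "STOP" then (st.1 ++ [sentence], []) else (st.1, sentence))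
    ([], [])
  st.1

-- ===== PORT B =====
-- Phase 1: group the stream into sentences ending with "STOP"; trailing material dropped.
def groupStops : List String → List String → List (List String)
  | [], _ => []
  | t :: rest, current =>
    if t == "STOP" then (current ++ [t]) :: groupStops rest []
    else groupStops rest (current ++ [t])

def replace_rare_alt (brown : List String) (knownwords : List String) : List (List String) :=
  let known_set : PySem.Set String := PySem.Set.ofList knownwords
  (groupStops brown []).map
    (fun sentence => sentence.map (fun t => if known_set.contains t then t else "_RARE_"))

-- ===== PRECONDITION & SPEC =====
def Spec_replace_rare (brown : List String) (knownwords : List String) (out : List (List String)) : Prop := out = replace_rare_alt brown knownwords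
instance (brown : List String) (knownwords : List String) (out : List (List String)) : Decidable (Spec_replace_rare brown knownwords out) := by unfold Spec_replace_rare; infer_instance

-- ===== CLAIM (what is proved, stated in full; the proofs are below) =====
def Claim_equal_replace_rare : Prop := ∀ (brown : List String) (knownwords : List String), Dom_replace_rare brown knownwords → Spec_replace_rare brown knownwords (replace_rare brown knownwords)

-- ===== LEMMAS AND PROOFS =====

-- ===== VERDICT (by name: the statement is the Claim_ definition above) =====
theorem rr_key (knownwords : List String) :
    ∀ (brown : List String) (acc : List (List String)) (cur : List String),
      (brown.foldl
        (fun (st : List (List String) × List String) token =>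
          let sentence := st.2 ++ [if (PySem.Set.ofList knownwords).contains token then token else "_RARE_"]
          if token == "STOP" then (st.1 ++ [sentence], []) else (st.1, sentence))
        (acc, cur.map (fun t => if (PySem.Set.ofList knownwords).contains t then t else "_RARE_"))).1
      = acc ++ (groupStops brown cur).map
          (fun sentence => sentence.map (fun t => if (PySem.Set.ofList knownwords).contains t then t else "_RARE_")) := by
  intro brown
  induction brown with
  | nil => intro acc cur; simp [groupStops]
  | cons t rest ih =>
    intro acc cur
    simp only [List.foldl_cons, groupStops]
    by_cases h : t == "STOP"
    · simp only [h]
      have h1 : (cur.map (fun t => if (PySem.Set.ofList knownwords).contains t then t else "_RARE_"))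
            ++ [if (PySem.Set.ofList knownwords).contains t then t else "_RARE_"]
          = (cur ++ [t]).map (fun t => if (PySem.Set.ofList knownwords).contains t then t else "_RARE_") := by
        simp
      rw [h1]
      have := ih (acc ++ [(cur ++ [t]).map (fun t => if (PySem.Set.ofList knownwords).contains t then t else "_RARE_")]) []
      simpa using this
    · simp only [h]
      have h1 : (cur.map (fun t => if (PySem.Set.ofList knownwords).contains t then t else "_RARE_"))
            ++ [if (PySem.Set.ofList knownwords).contains t then t else "_RARE_"]
          = (cur ++ [t]).map (fun t => if (PySem.Set.ofList knownwords).contains t then t else "_RARE_") := by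
        simp
      rw [h1]
      exact ih acc (cur ++ [t])

theorem replace_rare_spec : Claim_equal_replace_rare := by
  intro brown knownwords _
  unfold Spec_replace_rare replace_rare replace_rare_alt
  have := rr_key knownwords brown [] []
  simpa using this
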